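-- pv_equiv track=rewrite | github.com/wellrccity/Resonance_M | src/generators.py | montar_silabas
-- ===== SOURCE A (Python) =====
-- def montar_silabas(chars, padrao='cv'):
--     vog=[c for c in chars if c.lower() in 'aeiou']
--     con=[c for c in chars if c.isalpha() and c.lower() not in 'aeiou']
--     dig=[c for c in chars if c.isdigit()]
--     if not vog: vog=['a']
--     if not con: con=['n']
--     slots=len(chars)-len(dig)
--     if slots<=0: return ''.join(dig[:len(chars)])
--     ix=[0,0]
--     def pv(): c=vog[ix[0]%len(vog)]; ix[0]+=1; return c
--     def pc(): c=con[ix[1]%len(con)]; ix[1]+=1; return c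
--     r=[]
--     if padrao=='raw':
--         for c in chars:
--             if c.isalpha() and len(r)<slots: r.append(c)
--     elif padrao=='vc':
--         while len(r)<slots:
--             r.append(pv())
--             if len(r)<slots: r.append(pc())
--     elif padrao=='cvc':
--         while len(r)<slots:
--             r.append(pc())
--             if len(r)<slots: r.append(pv())
--             if len(r)<slots: r.append(pc())
--     elif padrao=='cvcv':
--         while len(r)<slots:
--             for fn in [pc,pv,pc,pv]:
--                 if len(r)<slots: r.append(fn())
--     elif padrao=='vcv':
--         while len(r)<slots:
--             for fn in [pv,pc,pv]:
--                 if len(r)<slots: r.append(fn())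
--     elif padrao=='alt':
--         uc=True
--         while len(r)<slots: r.append(pc() if uc else pv()); uc=not uc
--     else:
--         while len(r)<slots:
--             r.append(pc())
--             if len(r)<slots: r.append(pv())
--     r=r[:slots]+dig
--     return ''.join(r[:len(chars)])
-- ===== SOURCE B (Python) =====
-- def montar_silabas(chars, padrao='cv'):
--     vog = [c for c in chars if c.lower() in 'aeiou']
--     con = [c for c in chars if c.isalpha() and c.lower() not in 'aeiou']
--     dig = [c for c in chars if c.isdigit()]
--     vog = vog or ['a']
--     con = con or ['n']
--     slots = len(chars) - len(dig)
--     if slots <= 0: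
--         return ''.join(dig[:len(chars)])
--     if padrao == 'raw':
--         r = [c for c in chars if c.isalpha()][:slots]
--     else:
--         roles = {'vc': 'vc', 'cvc': 'cvc', 'cvcv': 'cv', 'vcv': 'vcv', 'alt': 'cv'}.get(padrao, 'cv')
--         nv = nc = 0
--         r = []
--         for i in range(slots):
--             if roles[i % len(roles)] == 'v':
--                 r.append(vog[nv % len(vog)]); nv += 1
--             else:
--                 r.append(con[nc % len(con)]); nc += 1
--     return ''.join((r + dig)[:len(chars)])
-- ===== Notes on version B (the rewrite author's own statement) =====
-- stated objective: simpler
-- what changed: The six hand-unrolled while-loop pattern branches of A are replaced by one table-driven loop: a dict maps the padrao to a role string of 'c'/'v' and a single indexed loop cycles through it, pulling from the vowel/consonant lists; the 'raw' branch becomes a filter+slice.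
import Mathlib
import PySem

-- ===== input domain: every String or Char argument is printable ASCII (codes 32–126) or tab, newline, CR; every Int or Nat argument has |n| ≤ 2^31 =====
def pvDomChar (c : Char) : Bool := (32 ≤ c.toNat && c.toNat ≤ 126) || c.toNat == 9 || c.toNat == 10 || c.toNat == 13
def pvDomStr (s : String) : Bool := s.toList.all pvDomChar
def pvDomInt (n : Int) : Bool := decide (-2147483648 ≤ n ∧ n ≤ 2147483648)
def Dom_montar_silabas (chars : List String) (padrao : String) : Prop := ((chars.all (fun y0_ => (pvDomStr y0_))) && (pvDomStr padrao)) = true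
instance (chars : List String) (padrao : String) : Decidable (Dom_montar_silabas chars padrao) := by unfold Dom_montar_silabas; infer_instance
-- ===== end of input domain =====

-- B replaces A's six hand-unrolled pattern loops by one table-driven loop over a role string ('c'/'v'); same values, same O(n) cost (objective: simpler).

-- ===== PORT A =====
-- pv()/pc() of the Python: vog[ix % len(vog)] — index is always in range (vog/con are non-empty after the defaults), so getD is exact
def pick (xs : List String) (n : Nat) : String := xs.getD (n % xs.length) ""

-- 'raw' branch: for c in chars: if c.isalpha() and len(r)<slots: r.append(c)
def loopRaw (slots : Nat) : List String → List String → List String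
  | [], r => r
  | c :: cs, r =>
    if PySem.Str.strIsalpha c = true ∧ r.length < slots then loopRaw slots cs (r ++ [c])
    else loopRaw slots cs r

-- each while-loop below is ported with fuel = slots; every iteration with a true guard appends
-- at least one element, so after `slots` iterations the guard is false: fuel never cuts the loop short
def loopVC (vog con : List String) (slots : Nat) : Nat → List String → Nat → Nat → List String
  | 0, r, _, _ => r
  | f+1, r, iv, ic =>
    if r.length < slots then
      let r1 := r ++ [pick vog iv]
      if r1.length < slots then loopVC vog con slots f (r1 ++ [pick con ic]) (iv+1) (ic+1)
      else loopVC vog con slots f r1 (iv+1) ic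
    else r

def loopCVC (vog con : List String) (slots : Nat) : Nat → List String → Nat → Nat → List String
  | 0, r, _, _ => r
  | f+1, r, iv, ic =>
    if r.length < slots then
      let r1 := r ++ [pick con ic]
      if r1.length < slots then
        let r2 := r1 ++ [pick vog iv]
        if r2.length < slots then loopCVC vog con slots f (r2 ++ [pick con (ic+1)]) (iv+1) (ic+2)
        else loopCVC vog con slots f r2 (iv+1) (ic+1)
      else loopCVC vog con slots f r1 iv (ic+1)
    else r

-- for fn in [pc,pv,...]: if len(r)<slots: r.append(fn())  — folded over the role tags of the fn list
def stepFn (vog con : List String) (slots : Nat) (st : List String × Nat × Nat) (role : Char) : List String × Nat × Nat :=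
  if st.1.length < slots then
    if role = 'v' then (st.1 ++ [pick vog st.2.1], st.2.1 + 1, st.2.2)
    else (st.1 ++ [pick con st.2.2], st.2.1, st.2.2 + 1)
  else st

def loopFns (vog con : List String) (slots : Nat) (pat : List Char) : Nat → List String × Nat × Nat → List String
  | 0, st => st.1
  | f+1, st => if st.1.length < slots then loopFns vog con slots pat f (pat.foldl (stepFn vog con slots) st) else st.1

def loopAlt (vog con : List String) (slots : Nat) : Nat → List String → Bool → Nat → Nat → List String
  | 0, r, _, _, _ => r
  | f+1, r, uc, iv, ic =>
    if r.length < slots then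
      if uc then loopAlt vog con slots f (r ++ [pick con ic]) (!uc) iv (ic+1)
      else loopAlt vog con slots f (r ++ [pick vog iv]) (!uc) (iv+1) ic
    else r

-- default branch: while len(r)<slots: r.append(pc()); if len(r)<slots: r.append(pv())
def loopCV (vog con : List String) (slots : Nat) : Nat → List String → Nat → Nat → List String
  | 0, r, _, _ => r
  | f+1, r, iv, ic =>
    if r.length < slots then
      let r1 := r ++ [pick con ic]
      if r1.length < slots then loopCV vog con slots f (r1 ++ [pick vog iv]) (iv+1) (ic+1)
      else loopCV vog con slots f r1 iv (ic+1)
    else r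

-- slots = len(chars) - len(dig) is never negative in Python (dig is a sub-filter of chars), so Nat subtraction and `slots = 0` for `slots <= 0` are exact
def montar_silabas (chars : List String) (padrao : String) : String :=
  let vog0 := chars.filter (fun c => PySem.Str.isIn (PySem.Str.lower c) "aeiou")
  let con0 := chars.filter (fun c => PySem.Str.strIsalpha c && !PySem.Str.isIn (PySem.Str.lower c) "aeiou")
  let dig := chars.filter (fun c => PySem.Str.strIsdigit c)
  let vog := if vog0.isEmpty then ["a"] else vog0
  let con := if con0.isEmpty then ["n"] else con0
  let slots := chars.length - dig.length
  if slots = 0 then PySem.Str.join "" (dig.take chars.length)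
  else
    let r :=
      if padrao = "raw" then loopRaw slots chars []
      else if padrao = "vc" then loopVC vog con slots slots [] 0 0
      else if padrao = "cvc" then loopCVC vog con slots slots [] 0 0
      else if padrao = "cvcv" then loopFns vog con slots ['c','v','c','v'] slots ([], 0, 0)
      else if padrao = "vcv" then loopFns vog con slots ['v','c','v'] slots ([], 0, 0)
      else if padrao = "alt" then loopAlt vog con slots slots [] true 0 0
      else loopCV vog con slots slots [] 0 0
    PySem.Str.join "" ((r.take slots ++ dig).take chars.length)

-- ===== PORT B =====
-- for i in range(slots): append from vog/con according to roles[i % len(roles)]  (roles is never empty, so getD is exact)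
def fillLoop (pat : List Char) (vog con : List String) (slots i : Nat) (r : List String) (nv nc : Nat) : List String :=
  if i < slots then
    if pat.getD (i % pat.length) ' ' = 'v' then
      fillLoop pat vog con slots (i+1) (r ++ [pick vog nv]) (nv+1) nc
    else
      fillLoop pat vog con slots (i+1) (r ++ [pick con nc]) nv (nc+1)
  else r
termination_by slots - i
decreasing_by all_goals omega

def montar_silabas_alt (chars : List String) (padrao : String) : String :=
  let vog0 := chars.filter (fun c => PySem.Str.isIn (PySem.Str.lower c) "aeiou")
  let con0 := chars.filter (fun c => PySem.Str.strIsalpha c && !PySem.Str.isIn (PySem.Str.lower c) "aeiou")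
  let dig := chars.filter (fun c => PySem.Str.strIsdigit c)
  let vog := if vog0.isEmpty then ["a"] else vog0
  let con := if con0.isEmpty then ["n"] else con0
  let slots := chars.length - dig.length
  if slots = 0 then PySem.Str.join "" (dig.take chars.length)
  else
    let r :=
      if padrao = "raw" then (chars.filter (fun c => PySem.Str.strIsalpha c)).take slots
      else
        let roles := ((PySem.Dict.ofList [("vc","vc"),("cvc","cvc"),("cvcv","cv"),("vcv","vcv"),("alt","cv")]).getD padrao "cv").toList
        fillLoop roles vog con slots 0 [] 0 0
    PySem.Str.join "" ((r ++ dig).take chars.length)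

-- ===== PRECONDITION & SPEC =====
def Spec_montar_silabas (chars : List String) (padrao : String) (out : String) : Prop := out = montar_silabas_alt chars padrao
instance (chars : List String) (padrao : String) (out : String) : Decidable (Spec_montar_silabas chars padrao out) := by unfold Spec_montar_silabas; infer_instance

-- ===== CLAIM (what is proved, stated in full; the proofs are below) =====
def Claim_equal_montar_silabas : Prop := ∀ (chars : List String) (padrao : String), Dom_montar_silabas chars padrao → Spec_montar_silabas chars padrao (montar_silabas chars padrao)

-- ===== LEMMAS AND PROOFS =====

-- the common specification: k picks driven by the cyclic role pattern, starting at role index i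
def fill (pat : List Char) (vog con : List String) : Nat → Nat → Nat → Nat → List String
  | 0, _, _, _ => []
  | k+1, i, nv, nc =>
    if pat.getD (i % pat.length) ' ' = 'v' then pick vog nv :: fill pat vog con k (i+1) (nv+1) nc
    else pick con nc :: fill pat vog con k (i+1) nv (nc+1)

theorem fill_shift (pat : List Char) (vog con : List String) :
    ∀ k i nv nc, fill pat vog con k (i + pat.length) nv nc = fill pat vog con k i nv nc := by
  intro k
  induction k with
  | zero => intro i nv nc; rfl
  | succ k ih =>
    intro i nv nc
    simp only [fill, Nat.add_mod_right]
    have h1 : i + pat.length + 1 = (i + 1) + pat.length := by omega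
    simp only [h1, ih]

theorem fill_length (pat : List Char) (vog con : List String) :
    ∀ k i nv nc, (fill pat vog con k i nv nc).length = k := by
  intro k
  induction k with
  | zero => intro i nv nc; rfl
  | succ k ih => intro i nv nc; simp only [fill]; split <;> simp [ih]

theorem fillLoop_eq (pat : List Char) (vog con : List String) (slots : Nat) :
    ∀ k i r nv nc, slots - i = k →
      fillLoop pat vog con slots i r nv nc = r ++ fill pat vog con (slots - i) i nv nc := by
  intro k
  induction k with
  | zero =>
    intro i r nv nc hk
    rw [fillLoop, if_neg (by omega), hk]
    simp [fill]
  | succ k ih =>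
    intro i r nv nc hk
    obtain ⟨m, hm⟩ : ∃ m, slots - i = m + 1 := ⟨k, hk⟩
    rw [fillLoop, if_pos (by omega), hm]
    simp only [fill]
    split
    · rw [ih (i+1) _ _ _ (by omega)]
      have hmm : slots - (i + 1) = m := by omega
      rw [hmm]; simp
    · rw [ih (i+1) _ _ _ (by omega)]
      have hmm : slots - (i + 1) = m := by omega
      rw [hmm]; simp

theorem loopVC_full (vog con : List String) (slots : Nat) :
    ∀ f r iv ic, slots ≤ r.length → loopVC vog con slots f r iv ic = r := by
  intro f r iv ic h
  cases f with
  | zero => rfl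
  | succ f => rw [loopVC.eq_def]; simp [Nat.not_lt.mpr h]

theorem loopCV_full (vog con : List String) (slots : Nat) :
    ∀ f r iv ic, slots ≤ r.length → loopCV vog con slots f r iv ic = r := by
  intro f r iv ic h
  cases f with
  | zero => rfl
  | succ f => rw [loopCV.eq_def]; simp [Nat.not_lt.mpr h]

theorem loopCVC_full (vog con : List String) (slots : Nat) :
    ∀ f r iv ic, slots ≤ r.length → loopCVC vog con slots f r iv ic = r := by
  intro f r iv ic h
  cases f with
  | zero => rfl
  | succ f => rw [loopCVC.eq_def]; simp [Nat.not_lt.mpr h]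

theorem loopFns_full (vog con : List String) (slots : Nat) (pat : List Char) :
    ∀ f st, slots ≤ st.1.length → loopFns vog con slots pat f st = st.1 := by
  intro f st h
  cases f with
  | zero => rfl
  | succ f => rw [loopFns.eq_def]; simp [Nat.not_lt.mpr h]

theorem stepFn_lt_v (vog con : List String) (slots : Nat) (r : List String) (iv ic : Nat)
    (h : r.length < slots) : stepFn vog con slots (r, iv, ic) 'v' = (r ++ [pick vog iv], iv + 1, ic) := by
  simp [stepFn, h]

theorem stepFn_lt_c (vog con : List String) (slots : Nat) (r : List String) (iv ic : Nat)
    (h : r.length < slots) : stepFn vog con slots (r, iv, ic) 'c' = (r ++ [pick con ic], iv, ic + 1) := by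
  simp [stepFn, h]

theorem stepFn_ge (vog con : List String) (slots : Nat) (r : List String) (iv ic : Nat) (role : Char)
    (h : ¬ r.length < slots) : stepFn vog con slots (r, iv, ic) role = (r, iv, ic) := by
  simp [stepFn, h]

theorem loopVC_eq (vog con : List String) (slots : Nat) :
    ∀ f r iv ic, slots ≤ r.length + f →
      loopVC vog con slots f r iv ic = r ++ fill ['v','c'] vog con (slots - r.length) 0 iv ic := by
  intro f
  induction f with
  | zero =>
    intro r iv ic h
    have h0 : slots - r.length = 0 := by omega
    simp [loopVC, h0, fill]
  | succ f ih =>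
    intro r iv ic h
    by_cases hlt : r.length < slots
    · simp only [loopVC]
      rw [if_pos hlt]
      by_cases h2 : r.length + 1 < slots
      · rw [if_pos (by simpa using h2)]
        rw [ih _ _ _ (by simp; omega)]
        obtain ⟨m, hm⟩ : ∃ m, slots - r.length = m + 2 := ⟨slots - r.length - 2, by omega⟩
        have hm2 : slots - (r ++ [pick vog iv] ++ [pick con ic]).length = m := by simp; omega
        rw [hm2, hm]
        simp only [fill]
        rw [if_pos (by decide), if_neg (by decide)]
        have hsh : fill ['v','c'] vog con m 2 (iv+1) (ic+1) = fill ['v','c'] vog con m 0 (iv+1) (ic+1) :=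
          fill_shift _ _ _ _ 0 _ _
        rw [hsh]
        simp
      · rw [if_neg (by simpa using h2)]
        rw [loopVC_full vog con slots f _ _ _ (by simp; omega)]
        have hm : slots - r.length = 1 := by omega
        rw [hm]
        simp [fill]
    · have h0 : slots - r.length = 0 := by omega
      simp only [loopVC]
      rw [if_neg hlt, h0]
      simp [fill]

theorem loopCV_eq (vog con : List String) (slots : Nat) :
    ∀ f r iv ic, slots ≤ r.length + f →
      loopCV vog con slots f r iv ic = r ++ fill ['c','v'] vog con (slots - r.length) 0 iv ic := by
  intro f
  induction f with
  | zero =>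
    intro r iv ic h
    have h0 : slots - r.length = 0 := by omega
    simp [loopCV, h0, fill]
  | succ f ih =>
    intro r iv ic h
    by_cases hlt : r.length < slots
    · simp only [loopCV]
      rw [if_pos hlt]
      by_cases h2 : r.length + 1 < slots
      · rw [if_pos (by simpa using h2)]
        rw [ih _ _ _ (by simp; omega)]
        obtain ⟨m, hm⟩ : ∃ m, slots - r.length = m + 2 := ⟨slots - r.length - 2, by omega⟩
        have hm2 : slots - (r ++ [pick con ic] ++ [pick vog iv]).length = m := by simp; omega
        rw [hm2, hm]
        simp only [fill]
        rw [if_neg (by decide), if_pos (by decide)]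
        have hsh : fill ['c','v'] vog con m 2 (iv+1) (ic+1) = fill ['c','v'] vog con m 0 (iv+1) (ic+1) :=
          fill_shift _ _ _ _ 0 _ _
        rw [hsh]
        simp
      · rw [if_neg (by simpa using h2)]
        rw [loopCV_full vog con slots f _ _ _ (by simp; omega)]
        have hm : slots - r.length = 1 := by omega
        rw [hm]
        simp [fill]
    · have h0 : slots - r.length = 0 := by omega
      simp only [loopCV]
      rw [if_neg hlt, h0]
      simp [fill]

theorem loopCVC_eq (vog con : List String) (slots : Nat) :
    ∀ f r iv ic, slots ≤ r.length + f →
      loopCVC vog con slots f r iv ic = r ++ fill ['c','v','c'] vog con (slots - r.length) 0 iv ic := by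
  intro f
  induction f with
  | zero =>
    intro r iv ic h
    have h0 : slots - r.length = 0 := by omega
    simp [loopCVC, h0, fill]
  | succ f ih =>
    intro r iv ic h
    by_cases hlt : r.length < slots
    · simp only [loopCVC]
      rw [if_pos hlt]
      by_cases h2 : r.length + 1 < slots
      · rw [if_pos (by simpa using h2)]
        by_cases h3 : r.length + 2 < slots
        · rw [if_pos (by simp; omega)]
          rw [ih _ _ _ (by simp; omega)]
          obtain ⟨m, hm⟩ : ∃ m, slots - r.length = m + 3 := ⟨slots - r.length - 3, by omega⟩
          have hm2 : slots - (r ++ [pick con ic] ++ [pick vog iv] ++ [pick con (ic+1)]).length = m := by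
            simp; omega
          rw [hm2, hm]
          simp only [fill]
          rw [if_neg (by decide), if_pos (by decide), if_neg (by decide)]
          have hsh : fill ['c','v','c'] vog con m 3 (iv+1) (ic+2) = fill ['c','v','c'] vog con m 0 (iv+1) (ic+2) :=
            fill_shift _ _ _ _ 0 _ _
          rw [hsh]
          simp
        · rw [if_neg (by simp; omega)]
          rw [loopCVC_full vog con slots f _ _ _ (by simp; omega)]
          have hm : slots - r.length = 2 := by omega
          rw [hm]
          simp [fill]
      · rw [if_neg (by simpa using h2)]
        rw [loopCVC_full vog con slots f _ _ _ (by simp; omega)]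
        have hm : slots - r.length = 1 := by omega
        rw [hm]
        simp [fill]
    · have h0 : slots - r.length = 0 := by omega
      simp only [loopCVC]
      rw [if_neg hlt, h0]
      simp [fill]

theorem loopAlt_eq (vog con : List String) (slots : Nat) :
    ∀ f r uc iv ic, slots ≤ r.length + f →
      loopAlt vog con slots f r uc iv ic
        = r ++ fill ['c','v'] vog con (slots - r.length) (if uc then 0 else 1) iv ic := by
  intro f
  induction f with
  | zero =>
    intro r uc iv ic h
    have h0 : slots - r.length = 0 := by omega
    simp [loopAlt, h0, fill]
  | succ f ih =>
    intro r uc iv ic h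
    by_cases hlt : r.length < slots
    · simp only [loopAlt]
      rw [if_pos hlt]
      obtain ⟨m, hm⟩ : ∃ m, slots - r.length = m + 1 := ⟨slots - r.length - 1, by omega⟩
      cases uc with
      | true =>
        rw [if_pos rfl]
        rw [ih _ _ _ _ (by simp; omega)]
        have hm2 : slots - (r ++ [pick con ic]).length = m := by simp; omega
        rw [hm2, hm]
        simp only [fill]
        rw [if_neg (by decide)]
        simp
      | false =>
        rw [if_neg (by simp)]
        rw [ih _ _ _ _ (by simp; omega)]
        have hm2 : slots - (r ++ [pick vog iv]).length = m := by simp; omega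
        rw [hm2, hm]
        have hb : (if (false : Bool) = true then (0:Nat) else 1) = 1 := rfl
        rw [hb]
        simp only [fill]
        rw [if_pos (by decide)]
        have hsh : fill ['c','v'] vog con m (1+1) (iv+1) ic = fill ['c','v'] vog con m 0 (iv+1) ic :=
          fill_shift _ _ _ _ 0 _ _
        rw [hsh]
        simp
    · have h0 : slots - r.length = 0 := by omega
      simp only [loopAlt]
      rw [if_neg hlt, h0]
      simp [fill]

theorem loopFns_cvcv_eq (vog con : List String) (slots : Nat) :
    ∀ f r iv ic, slots ≤ r.length + f →
      loopFns vog con slots ['c','v','c','v'] f (r, iv, ic)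
        = r ++ fill ['c','v','c','v'] vog con (slots - r.length) 0 iv ic := by
  intro f
  induction f with
  | zero =>
    intro r iv ic h
    have h0 : slots - r.length = 0 := by omega
    simp [loopFns, h0, fill]
  | succ f ih =>
    intro r iv ic h
    by_cases hlt : r.length < slots
    · simp only [loopFns, List.foldl]
      rw [if_pos hlt]
      rw [stepFn_lt_c vog con slots r iv ic hlt]
      by_cases h2 : r.length + 1 < slots
      · rw [stepFn_lt_v vog con slots _ iv (ic+1) (by simp; omega)]
        by_cases h3 : r.length + 2 < slots
        · rw [stepFn_lt_c vog con slots _ (iv+1) (ic+1) (by simp; omega)]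
          by_cases h4 : r.length + 3 < slots
          · rw [stepFn_lt_v vog con slots _ (iv+1) (ic+2) (by simp; omega)]
            rw [ih _ _ _ (by simp; omega)]
            obtain ⟨m, hm⟩ : ∃ m, slots - r.length = m + 4 := ⟨slots - r.length - 4, by omega⟩
            have hm2 : slots - (r ++ [pick con ic] ++ [pick vog iv] ++ [pick con (ic+1)] ++ [pick vog (iv+1)]).length = m := by
              simp; omega
            rw [hm2, hm]
            simp only [fill]
            rw [if_neg (by decide), if_pos (by decide), if_neg (by decide), if_pos (by decide)]
            have hsh : fill ['c','v','c','v'] vog con m 4 (iv+2) (ic+2) = fill ['c','v','c','v'] vog con m 0 (iv+2) (ic+2) :=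
              fill_shift _ _ _ _ 0 _ _
            rw [hsh]
            simp
          · rw [stepFn_ge vog con slots _ (iv+1) (ic+2) 'v' (by simp; omega)]
            rw [loopFns_full vog con slots _ f _ (by simp; omega)]
            have hm : slots - r.length = 3 := by omega
            rw [hm]
            simp [fill]
        · rw [stepFn_ge vog con slots _ (iv+1) (ic+1) 'c' (by simp; omega)]
          rw [stepFn_ge vog con slots _ (iv+1) (ic+1) 'v' (by simp; omega)]
          rw [loopFns_full vog con slots _ f _ (by simp; omega)]
          have hm : slots - r.length = 2 := by omega
          rw [hm]
          simp [fill]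
      · rw [stepFn_ge vog con slots _ iv (ic+1) 'v' (by simp; omega)]
        rw [stepFn_ge vog con slots _ iv (ic+1) 'c' (by simp; omega)]
        rw [stepFn_ge vog con slots _ iv (ic+1) 'v' (by simp; omega)]
        rw [loopFns_full vog con slots _ f _ (by simp; omega)]
        have hm : slots - r.length = 1 := by omega
        rw [hm]
        simp [fill]
    · have h0 : slots - r.length = 0 := by omega
      simp only [loopFns]
      rw [if_neg hlt, h0]
      simp [fill]

theorem loopFns_vcv_eq (vog con : List String) (slots : Nat) :
    ∀ f r iv ic, slots ≤ r.length + f →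
      loopFns vog con slots ['v','c','v'] f (r, iv, ic)
        = r ++ fill ['v','c','v'] vog con (slots - r.length) 0 iv ic := by
  intro f
  induction f with
  | zero =>
    intro r iv ic h
    have h0 : slots - r.length = 0 := by omega
    simp [loopFns, h0, fill]
  | succ f ih =>
    intro r iv ic h
    by_cases hlt : r.length < slots
    · simp only [loopFns, List.foldl]
      rw [if_pos hlt]
      rw [stepFn_lt_v vog con slots r iv ic hlt]
      by_cases h2 : r.length + 1 < slots
      · rw [stepFn_lt_c vog con slots _ (iv+1) ic (by simp; omega)]
        by_cases h3 : r.length + 2 < slots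
        · rw [stepFn_lt_v vog con slots _ (iv+1) (ic+1) (by simp; omega)]
          rw [ih _ _ _ (by simp; omega)]
          obtain ⟨m, hm⟩ : ∃ m, slots - r.length = m + 3 := ⟨slots - r.length - 3, by omega⟩
          have hm2 : slots - (r ++ [pick vog iv] ++ [pick con ic] ++ [pick vog (iv+1)]).length = m := by
            simp; omega
          rw [hm2, hm]
          simp only [fill]
          rw [if_pos (by decide), if_neg (by decide), if_pos (by decide)]
          have hsh : fill ['v','c','v'] vog con m 3 (iv+2) (ic+1) = fill ['v','c','v'] vog con m 0 (iv+2) (ic+1) :=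
            fill_shift _ _ _ _ 0 _ _
          rw [hsh]
          simp
        · rw [stepFn_ge vog con slots _ (iv+1) (ic+1) 'v' (by simp; omega)]
          rw [loopFns_full vog con slots _ f _ (by simp; omega)]
          have hm : slots - r.length = 2 := by omega
          rw [hm]
          simp [fill]
      · rw [stepFn_ge vog con slots _ (iv+1) ic 'c' (by simp; omega)]
        rw [stepFn_ge vog con slots _ (iv+1) ic 'v' (by simp; omega)]
        rw [loopFns_full vog con slots _ f _ (by simp; omega)]
        have hm : slots - r.length = 1 := by omega
        rw [hm]
        simp [fill]
    · have h0 : slots - r.length = 0 := by omega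
      simp only [loopFns]
      rw [if_neg hlt, h0]
      simp [fill]

theorem loopRaw_eq (slots : Nat) :
    ∀ cs r, loopRaw slots cs r
      = r ++ ((cs.filter (fun c => PySem.Str.strIsalpha c)).take (slots - r.length)) := by
  intro cs
  induction cs with
  | nil => intro r; simp [loopRaw]
  | cons c cs ih =>
    intro r
    by_cases ha : PySem.Str.strIsalpha c = true
    · by_cases hr : r.length < slots
      · rw [loopRaw, if_pos ⟨ha, hr⟩, ih]
        obtain ⟨m, hm⟩ : ∃ m, slots - r.length = m + 1 := ⟨slots - r.length - 1, by omega⟩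
        have hm2 : slots - (r ++ [c]).length = m := by simp; omega
        rw [hm2, hm, List.filter_cons_of_pos (by simpa using ha), List.take_succ_cons]
        simp
      · rw [loopRaw, if_neg (by tauto), ih]
        have h0 : slots - r.length = 0 := by omega
        simp [h0]
    · rw [loopRaw, if_neg (by tauto), ih]
      rw [List.filter_cons_of_neg (by simpa using ha)]

-- the role pattern "cvcv" cycles exactly like "cv"
theorem fill_cvcv_eq_cv (vog con : List String) :
    ∀ k i nv nc, fill ['c','v','c','v'] vog con k i nv nc = fill ['c','v'] vog con k i nv nc := by
  intro k
  induction k with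
  | zero => intro i nv nc; rfl
  | succ k ih =>
    intro i nv nc
    have h4 : i % 4 = 0 ∨ i % 4 = 1 ∨ i % 4 = 2 ∨ i % 4 = 3 := by omega
    rcases h4 with h | h | h | h
    · have h2 : i % 2 = 0 := by omega
      simp [fill, h, h2, ih]
    · have h2 : i % 2 = 1 := by omega
      simp [fill, h, h2, ih]
    · have h2 : i % 2 = 0 := by omega
      simp [fill, h, h2, ih]
    · have h2 : i % 2 = 1 := by omega
      simp [fill, h, h2, ih]

theorem take_fill (pat : List Char) (vog con : List String) (k i nv nc : Nat) :
    (fill pat vog con k i nv nc).take k = fill pat vog con k i nv nc :=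
  List.take_of_length_le (by rw [fill_length])

theorem dict_getD_default (p : String) (h2 : ¬ p = "vc") (h3 : ¬ p = "cvc") (h4 : ¬ p = "cvcv")
    (h5 : ¬ p = "vcv") (h6 : ¬ p = "alt") :
    ((PySem.Dict.ofList [("vc","vc"),("cvc","cvc"),("cvcv","cv"),("vcv","vcv"),("alt","cv")]).getD p "cv") = "cv" := by
  have hmk : (PySem.Dict.ofList [("vc","vc"),("cvc","cvc"),("cvcv","cv"),("vcv","vcv"),("alt","cv")])
      = PySem.Dict.mk [("vc","vc"),("cvc","cvc"),("cvcv","cv"),("vcv","vcv"),("alt","cv")] := by decide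
  rw [hmk, PySem.Dict.getD_eq_get?_getD]
  simp [PySem.Dict.get?, beq_iff_eq, Ne.symm h2, Ne.symm h3, Ne.symm h4, Ne.symm h5, Ne.symm h6]

theorem main_core (vog con dig chars : List String) (padrao : String) (slots : Nat) :
    (if slots = 0 then PySem.Str.join "" (dig.take chars.length)
     else
       let r :=
         if padrao = "raw" then loopRaw slots chars []
         else if padrao = "vc" then loopVC vog con slots slots [] 0 0
         else if padrao = "cvc" then loopCVC vog con slots slots [] 0 0
         else if padrao = "cvcv" then loopFns vog con slots ['c','v','c','v'] slots ([], 0, 0)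
         else if padrao = "vcv" then loopFns vog con slots ['v','c','v'] slots ([], 0, 0)
         else if padrao = "alt" then loopAlt vog con slots slots [] true 0 0
         else loopCV vog con slots slots [] 0 0
       PySem.Str.join "" ((r.take slots ++ dig).take chars.length))
  = (if slots = 0 then PySem.Str.join "" (dig.take chars.length)
     else
       let r :=
         if padrao = "raw" then (chars.filter (fun c => PySem.Str.strIsalpha c)).take slots
         else
           let roles := ((PySem.Dict.ofList [("vc","vc"),("cvc","cvc"),("cvcv","cv"),("vcv","vcv"),("alt","cv")]).getD padrao "cv").toList
           fillLoop roles vog con slots 0 [] 0 0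
       PySem.Str.join "" ((r ++ dig).take chars.length)) := by
  by_cases hs : slots = 0
  · simp [hs]
  · simp only [if_neg hs]
    by_cases h1 : padrao = "raw"
    · subst h1
      simp only [reduceIte]
      rw [loopRaw_eq]
      simp [List.take_take]
    · simp only [if_neg h1]
      have hfb : fillLoop (String.toList "cv") vog con slots 0 [] 0 0
          = fill ['c','v'] vog con slots 0 0 0 := by
        rw [fillLoop_eq _ _ _ _ (slots - 0) 0 [] 0 0 rfl]
        simp
      by_cases h2 : padrao = "vc"
      · subst h2
        simp only [reduceIte]
        rw [loopVC_eq vog con slots slots [] 0 0 (by simp)]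
        have hg : ((PySem.Dict.ofList [("vc","vc"),("cvc","cvc"),("cvcv","cv"),("vcv","vcv"),("alt","cv")]).getD "vc" "cv") = "vc" := by decide
        rw [hg]
        rw [fillLoop_eq _ _ _ _ (slots - 0) 0 [] 0 0 rfl]
        simp [take_fill]
      · simp only [if_neg h2]
        by_cases h3 : padrao = "cvc"
        · subst h3
          simp only [reduceIte]
          rw [loopCVC_eq vog con slots slots [] 0 0 (by simp)]
          have hg : ((PySem.Dict.ofList [("vc","vc"),("cvc","cvc"),("cvcv","cv"),("vcv","vcv"),("alt","cv")]).getD "cvc" "cv") = "cvc" := by decide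
          rw [hg]
          rw [fillLoop_eq _ _ _ _ (slots - 0) 0 [] 0 0 rfl]
          simp [take_fill]
        · simp only [if_neg h3]
          by_cases h4 : padrao = "cvcv"
          · subst h4
            simp only [reduceIte]
            rw [loopFns_cvcv_eq vog con slots slots [] 0 0 (by simp)]
            have hg : ((PySem.Dict.ofList [("vc","vc"),("cvc","cvc"),("cvcv","cv"),("vcv","vcv"),("alt","cv")]).getD "cvcv" "cv") = "cv" := by decide
            rw [hg, hfb]
            simp [take_fill, fill_cvcv_eq_cv]
          · simp only [if_neg h4]
            by_cases h5 : padrao = "vcv"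
            · subst h5
              simp only [reduceIte]
              rw [loopFns_vcv_eq vog con slots slots [] 0 0 (by simp)]
              have hg : ((PySem.Dict.ofList [("vc","vc"),("cvc","cvc"),("cvcv","cv"),("vcv","vcv"),("alt","cv")]).getD "vcv" "cv") = "vcv" := by decide
              rw [hg]
              rw [fillLoop_eq _ _ _ _ (slots - 0) 0 [] 0 0 rfl]
              simp [take_fill]
            · simp only [if_neg h5]
              by_cases h6 : padrao = "alt"
              · subst h6
                simp only [reduceIte]
                rw [loopAlt_eq vog con slots slots [] true 0 0 (by simp)]
                have hg : ((PySem.Dict.ofList [("vc","vc"),("cvc","cvc"),("cvcv","cv"),("vcv","vcv"),("alt","cv")]).getD "alt" "cv") = "cv" := by decide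
                rw [hg, hfb]
                simp [take_fill]
              · simp only [if_neg h6]
                rw [loopCV_eq vog con slots slots [] 0 0 (by simp)]
                rw [dict_getD_default padrao h2 h3 h4 h5 h6, hfb]
                simp [take_fill]

-- ===== VERDICT (by name: the statement is the Claim_ definition above) =====
theorem montar_silabas_spec : Claim_equal_montar_silabas := by
  intro chars padrao _
  unfold Spec_montar_silabas montar_silabas montar_silabas_alt
  exact main_core _ _ _ _ _ _
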